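-- pv_equiv track=rewrite | github.com/zejiran/python-for-cats | retos/modulos_retos_3.py | invicto_mas_largo
-- ===== SOURCE A (Python) =====
-- def invicto_mas_largo(goles_diccionarios: list, goles_adversario: list) -> int:
--     """ Invictos
--     Parámetros:
--       goles_diccionarios (list): Los goles anotados por Diccionarios F.C en cada una de las fechas. Se
--                                  garantiza que cada elemento de la lista es un entero no negativo.
--       goles_adversario (list): Los goles anotados por los adversarios de Diccionarios F.C en cada una de las
--                                fechas. Se garantiza que cada elemento de la lista es un entero no negativo.
--     Retorno:
--       int: Retorna la cantidad máxima de fechas consecutivas en que el equipo Diccionarios F.C no perdió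
--            durante la temporada anterior.
--     """
--     consecutivos_mayor = 0
--     i = 0
--     consecutivos = 0
--     while i < len(goles_diccionarios):
--         if goles_diccionarios[i] >= goles_adversario[i]:
--             consecutivos += 1
--             if consecutivos > consecutivos_mayor:
--                 consecutivos_mayor = consecutivos
--         else:
--             consecutivos = 0
--         i += 1
--     return consecutivos_mayor
-- ===== SOURCE B (Python) =====
-- def invicto_mas_largo(goles_diccionarios: list, goles_adversario: list) -> int:
--     # Gap-based reformulation: collect the dates lost, then the longest unbeaten
--     # streak is the largest gap between consecutive losses (with sentinels -1 and n).
--     n = len(goles_diccionarios)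
--     perdidas = [i for i in range(n) if goles_diccionarios[i] < goles_adversario[i]]
--     mayor = 0
--     previa = -1
--     for p in perdidas + [n]:
--         if p - previa - 1 > mayor:
--             mayor = p - previa - 1
--         previa = p
--     return mayor
-- ===== Notes on version B (the rewrite author's own statement) =====
-- stated objective: alternative
-- what changed: B replaces A's single pass with a running streak counter reset on each loss by a two-phase gap computation: it collects the indices of lost dates and returns the largest gap between consecutive losses (with sentinels -1 and n).
import Mathlib
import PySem

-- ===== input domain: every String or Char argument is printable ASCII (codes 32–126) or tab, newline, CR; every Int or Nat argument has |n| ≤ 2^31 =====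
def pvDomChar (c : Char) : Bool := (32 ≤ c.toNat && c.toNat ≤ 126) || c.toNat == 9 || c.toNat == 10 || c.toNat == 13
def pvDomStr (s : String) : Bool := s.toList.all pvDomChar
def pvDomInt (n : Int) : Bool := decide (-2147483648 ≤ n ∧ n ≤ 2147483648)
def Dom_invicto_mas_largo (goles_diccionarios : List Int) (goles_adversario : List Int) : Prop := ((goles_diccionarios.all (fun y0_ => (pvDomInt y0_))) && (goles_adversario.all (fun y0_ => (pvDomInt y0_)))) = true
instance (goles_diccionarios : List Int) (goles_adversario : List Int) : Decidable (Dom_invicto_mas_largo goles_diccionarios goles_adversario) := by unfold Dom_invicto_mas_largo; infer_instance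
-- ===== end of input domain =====

-- B replaces A's running counter (reset on each loss) by collecting the loss dates and
-- taking the largest gap between consecutive losses; equal return value on Pre_ (no mutation).

-- ===== PORT A =====
-- A's while loop: index i, running streak `consecutivos`, best `consecutivos_mayor`.
def pvLoopA (gd ga : List Int) (i : Nat) (mayor consecutivos : Int) : Int :=
  if _h : i < gd.length then
    if (PySem.List.pyGet? gd (i : Int)).getD 0 ≥ (PySem.List.pyGet? ga (i : Int)).getD 0 then
      pvLoopA gd ga (i + 1) (if consecutivos + 1 > mayor then consecutivos + 1 else mayor) (consecutivos + 1)
    else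
      pvLoopA gd ga (i + 1) mayor 0
  else mayor
termination_by gd.length - i

def invicto_mas_largo (goles_diccionarios : List Int) (goles_adversario : List Int) : Int :=
  pvLoopA goles_diccionarios goles_adversario 0 0 0

-- ===== PORT B =====
-- B's for loop over `perdidas + [n]` with state (mayor, previa).
def pvGapFold : List Int → Int → Int → Int
  | [], mayor, _ => mayor
  | p :: t, mayor, previa =>
      pvGapFold t (if p - previa - 1 > mayor then p - previa - 1 else mayor) p

def invicto_mas_largo_alt (goles_diccionarios : List Int) (goles_adversario : List Int) : Int :=
  let n : Int := goles_diccionarios.length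
  let perdidas := (PySem.List.pyRange 0 n 1).filter
    (fun i => (PySem.List.pyGet? goles_diccionarios i).getD 0 < (PySem.List.pyGet? goles_adversario i).getD 0)
  pvGapFold (perdidas ++ [n]) 0 (-1)

-- ===== PRECONDITION & SPEC =====
-- A indexes goles_adversario[i] for every i < len(goles_diccionarios), so it raises
-- IndexError exactly when goles_adversario is shorter; Pre_ excludes exactly those inputs.
def Pre_invicto_mas_largo (goles_diccionarios : List Int) (goles_adversario : List Int) : Prop :=
  goles_diccionarios.length ≤ goles_adversario.length
instance (goles_diccionarios : List Int) (goles_adversario : List Int) : Decidable (Pre_invicto_mas_largo goles_diccionarios goles_adversario) := by unfold Pre_invicto_mas_largo; infer_instance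

def pvWitness_invicto_mas_largo : List Int × List Int := ([2, 0, 1], [1, 0, 2])

def Spec_invicto_mas_largo (goles_diccionarios : List Int) (goles_adversario : List Int) (out : Int) : Prop := out = invicto_mas_largo_alt goles_diccionarios goles_adversario
instance (goles_diccionarios : List Int) (goles_adversario : List Int) (out : Int) : Decidable (Spec_invicto_mas_largo goles_diccionarios goles_adversario out) := by unfold Spec_invicto_mas_largo; infer_instance

-- ===== CLAIM (what is proved, stated in full; the proofs are below) =====
def Claim_equal_invicto_mas_largo : Prop := ∀ (goles_diccionarios : List Int) (goles_adversario : List Int), Dom_invicto_mas_largo goles_diccionarios goles_adversario → Pre_invicto_mas_largo goles_diccionarios goles_adversario → Spec_invicto_mas_largo goles_diccionarios goles_adversario (invicto_mas_largo goles_diccionarios goles_adversario)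

-- ===== LEMMAS AND PROOFS =====

-- the loss dates from index i on
def pvLossesFrom (gd ga : List Int) (i : Nat) : List Int :=
  (PySem.List.pyRange (i : Int) gd.length 1).filter
    (fun j => (PySem.List.pyGet? gd j).getD 0 < (PySem.List.pyGet? ga j).getD 0)

theorem pvLossesFrom_nil (gd ga : List Int) (i : Nat) (h : gd.length ≤ i) :
    pvLossesFrom gd ga i = [] := by
  unfold pvLossesFrom
  rw [PySem.List.pyRange_one_eq_nil (by exact_mod_cast h)]
  rfl

theorem pvLossesFrom_cons (gd ga : List Int) (i : Nat) (h : i < gd.length) :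
    pvLossesFrom gd ga i =
      (if (PySem.List.pyGet? gd (i : Int)).getD 0 < (PySem.List.pyGet? ga (i : Int)).getD 0
        then [(i : Int)] else []) ++ pvLossesFrom gd ga (i + 1) := by
  unfold pvLossesFrom
  rw [PySem.List.pyRange_one_cons (by exact_mod_cast h), List.filter_cons]
  have hc : ((i : Int) + 1) = ((i + 1 : Nat) : Int) := by push_cast; ring
  rw [hc]
  split_ifs with h1 h2 <;> simp_all <;> omega

-- every member of pvLossesFrom gd ga i is ≥ i
theorem pvLossesFrom_mem_ge (gd ga : List Int) (i : Nat) (q : Int)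
    (hq : q ∈ pvLossesFrom gd ga i) : (i : Int) ≤ q := by
  unfold pvLossesFrom at hq
  have := List.mem_filter.mp hq |>.1
  exact (PySem.List.mem_pyRange_one.mp this).1

-- updating the running best with a value dominated by the next gap does not change the result
theorem pvGapFold_absorb (t : List Int) (p b x previa : Int) (hx : x ≤ p - previa - 1) :
    pvGapFold (p :: t) (if x > b then x else b) previa = pvGapFold (p :: t) b previa := by
  show pvGapFold t _ p = pvGapFold t _ p
  congr 1
  split_ifs <;> omega

theorem pvLoopA_eq (gd ga : List Int) :
    ∀ (k i : Nat) (mayor consecutivos previa : Int),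
      gd.length - i = k →
      previa + consecutivos = (i : Int) - 1 →
      0 ≤ consecutivos → consecutivos ≤ mayor →
      pvLoopA gd ga i mayor consecutivos
        = pvGapFold (pvLossesFrom gd ga i ++ [(gd.length : Int)]) mayor previa := by
  intro k
  induction k with
  | zero =>
      intro i mayor consecutivos previa hk hinv h0 hle
      have hi : gd.length ≤ i := by omega
      have hni : (gd.length : Int) ≤ (i : Int) := by exact_mod_cast hi
      rw [pvLoopA, dif_neg (by omega), pvLossesFrom_nil gd ga i hi]
      simp only [List.nil_append, pvGapFold, if_neg (show ¬ ((gd.length : Int) - previa - 1 > mayor) by omega)]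
  | succ k ih =>
      intro i mayor consecutivos previa hk hinv h0 hle
      have hi : i < gd.length := by omega
      have hni : (i : Int) < (gd.length : Int) := by exact_mod_cast hi
      rw [pvLoopA, dif_pos hi, pvLossesFrom_cons gd ga i hi]
      by_cases hwin : (PySem.List.pyGet? gd (i : Int)).getD 0 ≥ (PySem.List.pyGet? ga (i : Int)).getD 0
      · -- non-loss at i: the loss list is unchanged, the best update is absorbed by the coming gap
        rw [if_pos hwin,
            if_neg (show ¬ ((PySem.List.pyGet? gd (i : Int)).getD 0 < (PySem.List.pyGet? ga (i : Int)).getD 0) by omega),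
            List.nil_append]
        have hih := ih (i + 1) (if consecutivos + 1 > mayor then consecutivos + 1 else mayor)
            (consecutivos + 1) previa (by omega) (by push_cast; omega) (by omega) (by split_ifs <;> omega)
        rw [hih]
        rcases hL : pvLossesFrom gd ga (i + 1) with _ | ⟨q, t⟩
        · rw [List.nil_append]
          exact pvGapFold_absorb [] (gd.length : Int) mayor (consecutivos + 1) previa (by omega)
        · have hq : ((i : Int) + 1) ≤ q := by
            have := pvLossesFrom_mem_ge gd ga (i + 1) q (by rw [hL]; exact List.mem_cons_self)
            push_cast at this; omega
          exact pvGapFold_absorb (t ++ [(gd.length : Int)]) q mayor (consecutivos + 1) previa (by omega)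
      · -- loss at i: emit i into the gap fold, reset the streak
        rw [if_neg hwin,
            if_pos (show (PySem.List.pyGet? gd (i : Int)).getD 0 < (PySem.List.pyGet? ga (i : Int)).getD 0 by omega)]
        simp only [List.cons_append, List.nil_append, pvGapFold]
        rw [if_neg (show ¬ ((i : Int) - previa - 1 > mayor) by omega)]
        exact ih (i + 1) mayor 0 (i : Int) (by omega) (by push_cast; omega) le_rfl (by omega)

-- ===== VERDICT (by name: the statement is the Claim_ definition above) =====
theorem invicto_mas_largo_spec : Claim_equal_invicto_mas_largo := by
  intro gd ga _ _
  unfold Spec_invicto_mas_largo invicto_mas_largo invicto_mas_largo_alt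
  rw [pvLoopA_eq gd ga (gd.length - 0) 0 0 0 (-1) rfl (by norm_num) le_rfl le_rfl]
  have : ((0 : Nat) : Int) = (0 : Int) := by norm_num
  unfold pvLossesFrom
  rw [this]
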